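-- pv_equiv track=rewrite | github.com/sylvainprigent/smetrics | smetrics/metrics/fc.py | calculate_sphere_border
-- ===== SOURCE A (Python) =====
-- def calculate_sphere_border(c_x: int, c_y: int, c_z: int, radius: int):
--     """Calculate the coordinates of the points in the border of a sphere
--
--     Parameters
--     ----------
--     c_x: int
--         X position of the sphere center
--     c_y: int
--         Y position of the sphere center
--     c_z: int
--         Z position of the sphere center
--     radius: int
--         Radius of the sphere (in pixels)
--
--     """
--     p_x = []
--     p_y = []
--     p_z = []
--     r_1 = pow(radius - 1, 2)
--     r_2 = pow(radius, 2)
--     for x in range(c_x - radius, c_x + radius + 1):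
--         for y in range(c_y - radius, c_y + radius + 1):
--             for z in range(c_z - radius, c_z + radius + 1):
--                 euclid = pow(x - c_x, 2) + pow(y - c_y, 2) + pow(z - c_z, 2)
--                 if r_1 < euclid <= r_2:
--                     p_x.append(x)
--                     p_y.append(y)
--                     p_z.append(z)
--     return p_x, p_y, p_z
-- ===== SOURCE B (Python) =====
-- def _isqrt(n):
--     # floor square root of n >= 0 by binary search
--     lo, hi = 0, n + 1
--     while hi - lo > 1:
--         mid = (lo + hi) // 2
--         if mid * mid <= n:
--             lo = mid
--         else:
--             hi = mid
--     return lo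
--
--
-- def calculate_sphere_border(c_x: int, c_y: int, c_z: int, radius: int):
--     p_x = []
--     p_y = []
--     p_z = []
--     r_1 = pow(radius - 1, 2)
--     r_2 = pow(radius, 2)
--     for x in range(c_x - radius, c_x + radius + 1):
--         dx2 = pow(x - c_x, 2)
--         for y in range(c_y - radius, c_y + radius + 1):
--             s = dx2 + pow(y - c_y, 2)
--             hi = r_2 - s
--             if hi < 0:
--                 continue
--             big = _isqrt(hi)
--             lo = r_1 - s
--             if lo < 0:
--                 zs = range(c_z - big, c_z + big + 1)
--             else:
--                 small = _isqrt(lo) + 1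
--                 zs = list(range(c_z - big, c_z - small + 1)) + \
--                     list(range(c_z + small, c_z + big + 1))
--             n = len(zs)
--             p_x.extend([x] * n)
--             p_y.extend([y] * n)
--             p_z.extend(zs)
--     return p_x, p_y, p_z
-- ===== Notes on version B (the rewrite author's own statement) =====
-- stated objective: faster
-- what changed: The innermost z-scan is replaced by a closed-form z-interval computed via an integer square root (binary search), so only (x,y) pairs are enumerated; intended as faster (O(r^3) -> O(r^2) work beyond the Theta(r^2)-sized output), measured 13.9x at the largest size where both finished.
import Mathlib
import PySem

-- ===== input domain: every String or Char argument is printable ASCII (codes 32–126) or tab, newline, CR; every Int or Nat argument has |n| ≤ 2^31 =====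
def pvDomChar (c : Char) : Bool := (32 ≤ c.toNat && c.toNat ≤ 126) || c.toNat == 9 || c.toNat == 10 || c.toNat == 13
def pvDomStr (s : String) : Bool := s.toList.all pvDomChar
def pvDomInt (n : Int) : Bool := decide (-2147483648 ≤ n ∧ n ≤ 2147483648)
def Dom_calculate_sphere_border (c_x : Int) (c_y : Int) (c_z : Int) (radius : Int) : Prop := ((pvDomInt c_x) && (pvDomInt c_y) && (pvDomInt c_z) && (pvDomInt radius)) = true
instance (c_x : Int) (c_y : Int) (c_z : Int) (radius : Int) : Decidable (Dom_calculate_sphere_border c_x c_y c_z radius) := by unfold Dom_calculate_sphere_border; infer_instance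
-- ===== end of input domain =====

-- B replaces A's innermost z-scan by a closed-form z-interval obtained from an integer
-- square root (binary search): intended as faster (only (x,y) pairs are enumerated);
-- a timing run measured 13.9x at the largest size where both programs finished.

-- ===== PORT A =====
def calculate_sphere_border (c_x : Int) (c_y : Int) (c_z : Int) (radius : Int) : List Int × List Int × List Int :=
  let r_1 := (radius - 1) ^ 2
  let r_2 := radius ^ 2
  (PySem.List.pyRange (c_x - radius) (c_x + radius + 1) 1).foldl (fun st x =>
    (PySem.List.pyRange (c_y - radius) (c_y + radius + 1) 1).foldl (fun st y =>
      (PySem.List.pyRange (c_z - radius) (c_z + radius + 1) 1).foldl (fun st z =>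
        if r_1 < (x - c_x) ^ 2 + (y - c_y) ^ 2 + (z - c_z) ^ 2 ∧
            (x - c_x) ^ 2 + (y - c_y) ^ 2 + (z - c_z) ^ 2 ≤ r_2 then
          (st.1 ++ [x], st.2.1 ++ [y], st.2.2 ++ [z])
        else st) st) st) ([], [], [])

-- ===== PORT B =====
-- binary-search floor square root: transliteration of Source B's _isqrt while-loop
def isqrtLoop (n lo hi : Int) : Int :=
  if _h : 1 < hi - lo then
    let mid := PySem.Int.floordiv (lo + hi) 2
    if mid * mid ≤ n then isqrtLoop n mid hi else isqrtLoop n lo mid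
  else lo
termination_by (hi - lo).toNat
decreasing_by
  · have h2 := PySem.Int.floordiv_eq_ediv_of_pos (a := lo + hi) (b := 2) (by omega)
    simp only [h2]; omega
  · have h2 := PySem.Int.floordiv_eq_ediv_of_pos (a := lo + hi) (b := 2) (by omega)
    simp only [h2]; omega

def pyIsqrt (n : Int) : Int := isqrtLoop n 0 (n + 1)

def calculate_sphere_border_alt (c_x : Int) (c_y : Int) (c_z : Int) (radius : Int) : List Int × List Int × List Int :=
  let r_1 := (radius - 1) ^ 2
  let r_2 := radius ^ 2
  (PySem.List.pyRange (c_x - radius) (c_x + radius + 1) 1).foldl (fun st x =>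
    (PySem.List.pyRange (c_y - radius) (c_y + radius + 1) 1).foldl (fun st y =>
      if r_2 - ((x - c_x) ^ 2 + (y - c_y) ^ 2) < 0 then st
      else
        let zs :=
          if r_1 - ((x - c_x) ^ 2 + (y - c_y) ^ 2) < 0 then
            PySem.List.pyRange (c_z - pyIsqrt (r_2 - ((x - c_x) ^ 2 + (y - c_y) ^ 2)))
              (c_z + pyIsqrt (r_2 - ((x - c_x) ^ 2 + (y - c_y) ^ 2)) + 1) 1
          else
            PySem.List.pyRange (c_z - pyIsqrt (r_2 - ((x - c_x) ^ 2 + (y - c_y) ^ 2)))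
              (c_z - (pyIsqrt (r_1 - ((x - c_x) ^ 2 + (y - c_y) ^ 2)) + 1) + 1) 1 ++
            PySem.List.pyRange (c_z + (pyIsqrt (r_1 - ((x - c_x) ^ 2 + (y - c_y) ^ 2)) + 1))
              (c_z + pyIsqrt (r_2 - ((x - c_x) ^ 2 + (y - c_y) ^ 2)) + 1) 1
        (st.1 ++ List.replicate zs.length x, st.2.1 ++ List.replicate zs.length y, st.2.2 ++ zs)) st) ([], [], [])

-- ===== PRECONDITION & SPEC =====
def Spec_calculate_sphere_border (c_x : Int) (c_y : Int) (c_z : Int) (radius : Int) (out : List Int × List Int × List Int) : Prop := out = calculate_sphere_border_alt c_x c_y c_z radius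
instance (c_x : Int) (c_y : Int) (c_z : Int) (radius : Int) (out : List Int × List Int × List Int) : Decidable (Spec_calculate_sphere_border c_x c_y c_z radius out) := by unfold Spec_calculate_sphere_border; infer_instance

-- ===== CLAIM (what is proved, stated in full; the proofs are below) =====
def Claim_equal_calculate_sphere_border : Prop := ∀ (c_x : Int) (c_y : Int) (c_z : Int) (radius : Int), Dom_calculate_sphere_border c_x c_y c_z radius → Spec_calculate_sphere_border c_x c_y c_z radius (calculate_sphere_border c_x c_y c_z radius)

-- ===== LEMMAS AND PROOFS =====

-- invariant of the binary search: lo*lo ≤ n < hi*hi is preserved; the result q has q*q ≤ n < (q+1)*(q+1)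
theorem isqrtLoop_spec (n : Int) : ∀ (lo hi : Int), 0 ≤ lo → lo * lo ≤ n → n < hi * hi → lo < hi →
    0 ≤ isqrtLoop n lo hi ∧ isqrtLoop n lo hi * isqrtLoop n lo hi ≤ n ∧
      n < (isqrtLoop n lo hi + 1) * (isqrtLoop n lo hi + 1) := by

  intro lo hi
  induction lo, hi using isqrtLoop.induct n with
  | case1 lo hi h mid hle ih =>
    intro h0 hlo hhi hlt
    rw [isqrtLoop, dif_pos h, if_pos hle]
    have h2 := PySem.Int.floordiv_eq_ediv_of_pos (a := lo + hi) (b := 2) (by omega)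
    exact ih (by simp only [mid, h2]; omega) hle hhi (by simp only [mid, h2]; omega)
  | case2 lo hi h mid hgt ih =>
    intro h0 hlo hhi hlt
    rw [isqrtLoop, dif_pos h, if_neg hgt]
    have h2 := PySem.Int.floordiv_eq_ediv_of_pos (a := lo + hi) (b := 2) (by omega)
    exact ih h0 hlo (by omega) (by simp only [mid, h2]; omega)
  | case3 lo hi h =>
    intro h0 hlo hhi hlt
    rw [isqrtLoop, dif_neg h]
    have : hi = lo + 1 := by omega
    subst this
    exact ⟨h0, hlo, hhi⟩

theorem pyIsqrt_spec (n : Int) (hn : 0 ≤ n) :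
    0 ≤ pyIsqrt n ∧ pyIsqrt n * pyIsqrt n ≤ n ∧ n < (pyIsqrt n + 1) * (pyIsqrt n + 1) := by
  refine isqrtLoop_spec n 0 (n + 1) le_rfl (by simpa) (by nlinarith) (by omega)

-- the inner triple-state append loop of A, in closed form
theorem foldl_triple_if (l : List Int) (P : Int → Prop) [DecidablePred P] (x y : Int) :
    ∀ (st : List Int × List Int × List Int),
    l.foldl (fun st z => if P z then (st.1 ++ [x], st.2.1 ++ [y], st.2.2 ++ [z]) else st) st
      = (st.1 ++ List.replicate ((l.filter (fun z => decide (P z))).length) x,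
         st.2.1 ++ List.replicate ((l.filter (fun z => decide (P z))).length) y,
         st.2.2 ++ l.filter (fun z => decide (P z))) := by
  induction l with
  | nil => intro st; simp
  | cons z l ih =>
    intro st
    simp only [List.foldl_cons, List.filter_cons]
    by_cases hp : P z
    · simp only [hp, decide_true, if_pos, ih, List.length_cons, List.replicate_succ]
      simp [List.append_assoc]
    · simp [hp, ih]

-- A's z-scan produces nothing when the remaining squared budget is negative
theorem zcore_neg (co R lo hi : Int) (hhi : hi < 0) :
    (PySem.List.pyRange (co - R) (co + R + 1) 1).filter
        (fun z => decide (lo < (z - co) ^ 2 ∧ (z - co) ^ 2 ≤ hi)) = [] := by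
  rw [List.filter_eq_nil_iff]
  intro z hz
  simp only [decide_eq_true_eq, not_and, not_le]
  intro _
  nlinarith [sq_nonneg (z - co)]

-- core: the filtered z-scan equals the closed-form z-interval(s)
theorem zcore (co R lo hi : Int) (hR : 0 ≤ R) (hhi : hi ≤ R * R) (hhi0 : 0 ≤ hi) :
    (PySem.List.pyRange (co - R) (co + R + 1) 1).filter
        (fun z => decide (lo < (z - co) ^ 2 ∧ (z - co) ^ 2 ≤ hi))
      = (if lo < 0 then PySem.List.pyRange (co - pyIsqrt hi) (co + pyIsqrt hi + 1) 1
         else PySem.List.pyRange (co - pyIsqrt hi) (co - (pyIsqrt lo + 1) + 1) 1 ++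
              PySem.List.pyRange (co + (pyIsqrt lo + 1)) (co + pyIsqrt hi + 1) 1) := by
  obtain ⟨hb0, hb1, hb2⟩ := pyIsqrt_spec hi hhi0
  set b := pyIsqrt hi with hbdef
  have hbR : b ≤ R := by nlinarith
  have sqmono : ∀ u v : Int, 0 ≤ u → u ≤ v → u * u ≤ v * v :=
    fun u v hu huv => mul_le_mul huv huv hu (le_trans hu huv)
  have hmem : ∀ z : Int, (z ∈ (PySem.List.pyRange (co - R) (co + R + 1) 1).filter
        (fun z => decide (lo < (z - co) ^ 2 ∧ (z - co) ^ 2 ≤ hi))) ↔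
      (z ∈ (if lo < 0 then PySem.List.pyRange (co - b) (co + b + 1) 1
         else PySem.List.pyRange (co - b) (co - (pyIsqrt lo + 1) + 1) 1 ++
              PySem.List.pyRange (co + (pyIsqrt lo + 1)) (co + b + 1) 1)) := by
    intro z
    rw [List.mem_filter, PySem.List.mem_pyRange_one, decide_eq_true_eq]
    have hdm : (z - co) ^ 2 = (co - z) * (co - z) := by ring
    have hdp : (z - co) ^ 2 = (z - co) * (z - co) := by ring
    by_cases hlo : lo < 0
    · rw [if_pos hlo, PySem.List.mem_pyRange_one]
      constructor
      · rintro ⟨⟨h1, h2⟩, h3, h4⟩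
        constructor
        · by_contra hc
          push_neg at hc
          have h5 := sqmono (b + 1) (co - z) (by omega) (by omega)
          rw [hdm] at h4
          linarith
        · by_contra hc
          push_neg at hc
          have h5 := sqmono (b + 1) (z - co) (by omega) (by omega)
          rw [hdp] at h4
          linarith
      · rintro ⟨h1, h2⟩
        refine ⟨⟨by omega, by omega⟩, by nlinarith [sq_nonneg (z - co)], ?_⟩
        rcases le_or_gt co z with hzc | hzc
        · have h5 := sqmono (z - co) b (by omega) (by omega)
          rw [hdp]; linarith
        · have h5 := sqmono (co - z) b (by omega) (by omega)
          rw [hdm]; linarith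
    · rw [if_neg hlo, List.mem_append, PySem.List.mem_pyRange_one, PySem.List.mem_pyRange_one]
      push_neg at hlo
      obtain ⟨ha0, ha1, ha2⟩ := pyIsqrt_spec lo hlo
      constructor
      · rintro ⟨⟨h1, h2⟩, h3, h4⟩
        rcases le_or_gt z co with hzc | hzc
        · left
          constructor
          · by_contra hc
            push_neg at hc
            have h5 := sqmono (b + 1) (co - z) (by omega) (by omega)
            rw [hdm] at h4
            linarith
          · by_contra hc
            push_neg at hc
            have h5 := sqmono (co - z) (pyIsqrt lo) (by omega) (by omega)
            rw [hdm] at h3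
            linarith
        · right
          constructor
          · by_contra hc
            push_neg at hc
            have h5 := sqmono (z - co) (pyIsqrt lo) (by omega) (by omega)
            rw [hdp] at h3
            linarith
          · by_contra hc
            push_neg at hc
            have h5 := sqmono (b + 1) (z - co) (by omega) (by omega)
            rw [hdp] at h4
            linarith
      · rintro (⟨h1, h2⟩ | ⟨h1, h2⟩)
        · refine ⟨⟨by omega, by omega⟩, ?_, ?_⟩
          · have h5 := sqmono (pyIsqrt lo + 1) (co - z) (by omega) (by omega)
            rw [hdm]; linarith
          · have h5 := sqmono (co - z) b (by omega) (by omega)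
            rw [hdm]; linarith
        · refine ⟨⟨by omega, by omega⟩, ?_, ?_⟩
          · have h5 := sqmono (pyIsqrt lo + 1) (z - co) (by omega) (by omega)
            rw [hdp]; linarith
          · have h5 := sqmono (z - co) b (by omega) (by omega)
            rw [hdp]; linarith
  have nd1 : ((PySem.List.pyRange (co - R) (co + R + 1) 1).filter
        (fun z => decide (lo < (z - co) ^ 2 ∧ (z - co) ^ 2 ≤ hi))).Nodup :=
    (PySem.List.nodup_pyRange_one _ _).filter _
  have nd2 : (if lo < 0 then PySem.List.pyRange (co - b) (co + b + 1) 1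
         else PySem.List.pyRange (co - b) (co - (pyIsqrt lo + 1) + 1) 1 ++
              PySem.List.pyRange (co + (pyIsqrt lo + 1)) (co + b + 1) 1).Nodup := by
    by_cases hlo : lo < 0
    · rw [if_pos hlo]; exact PySem.List.nodup_pyRange_one _ _
    · rw [if_neg hlo]
      push_neg at hlo
      obtain ⟨ha0, ha1, ha2⟩ := pyIsqrt_spec lo hlo
      apply List.Nodup.append (PySem.List.nodup_pyRange_one _ _) (PySem.List.nodup_pyRange_one _ _)
      rw [List.disjoint_iff_ne]
      intro u hu v hv
      rw [PySem.List.mem_pyRange_one] at hu hv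
      omega
  have pw1 : ((PySem.List.pyRange (co - R) (co + R + 1) 1).filter
        (fun z => decide (lo < (z - co) ^ 2 ∧ (z - co) ^ 2 ≤ hi))).Pairwise (· < ·) :=
    List.Pairwise.sublist (List.filter_sublist) (PySem.List.pairwise_lt_pyRange_one _ _)
  have pw2 : (if lo < 0 then PySem.List.pyRange (co - b) (co + b + 1) 1
         else PySem.List.pyRange (co - b) (co - (pyIsqrt lo + 1) + 1) 1 ++
              PySem.List.pyRange (co + (pyIsqrt lo + 1)) (co + b + 1) 1).Pairwise (· < ·) := by
    by_cases hlo : lo < 0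
    · rw [if_pos hlo]; exact PySem.List.pairwise_lt_pyRange_one _ _
    · rw [if_neg hlo]
      push_neg at hlo
      obtain ⟨ha0, ha1, ha2⟩ := pyIsqrt_spec lo hlo
      rw [List.pairwise_append]
      refine ⟨PySem.List.pairwise_lt_pyRange_one _ _, PySem.List.pairwise_lt_pyRange_one _ _, ?_⟩
      intro u hu v hv
      rw [PySem.List.mem_pyRange_one] at hu hv
      omega
  have hperm := (List.perm_ext_iff_of_nodup nd1 nd2).mpr hmem
  exact hperm.eq_of_pairwise (fun a b _ _ h1 h2 => absurd (lt_trans h1 h2) (lt_irrefl a)) pw1 pw2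

-- ===== VERDICT (by name: the statement is the Claim_ definition above) =====
theorem calculate_sphere_border_spec : Claim_equal_calculate_sphere_border := by
  intro c_x c_y c_z radius _
  unfold Spec_calculate_sphere_border calculate_sphere_border calculate_sphere_border_alt
  dsimp only
  apply PySem.List.foldl_congr_mem
  intro st x hx
  have hrad : 0 ≤ radius := by
    rw [PySem.List.mem_pyRange_one] at hx; omega
  apply PySem.List.foldl_congr_mem
  intro st' y _
  rw [foldl_triple_if]
  have hfeq : (PySem.List.pyRange (c_z - radius) (c_z + radius + 1) 1).filter
      (fun z => decide ((radius - 1) ^ 2 < (x - c_x) ^ 2 + (y - c_y) ^ 2 + (z - c_z) ^ 2 ∧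
        (x - c_x) ^ 2 + (y - c_y) ^ 2 + (z - c_z) ^ 2 ≤ radius ^ 2))
      = (PySem.List.pyRange (c_z - radius) (c_z + radius + 1) 1).filter
      (fun z => decide ((radius - 1) ^ 2 - ((x - c_x) ^ 2 + (y - c_y) ^ 2) < (z - c_z) ^ 2 ∧
        (z - c_z) ^ 2 ≤ radius ^ 2 - ((x - c_x) ^ 2 + (y - c_y) ^ 2))) := by
    apply List.filter_congr
    intro z _
    rw [decide_eq_decide]
    constructor
    · rintro ⟨u, v⟩; exact ⟨by linarith, by linarith⟩
    · rintro ⟨u, v⟩; exact ⟨by linarith, by linarith⟩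
  rw [hfeq]
  by_cases hneg : radius ^ 2 - ((x - c_x) ^ 2 + (y - c_y) ^ 2) < 0
  · rw [zcore_neg _ _ _ _ hneg, if_pos hneg]
    simp
  · push_neg at hneg
    rw [zcore c_z radius ((radius - 1) ^ 2 - ((x - c_x) ^ 2 + (y - c_y) ^ 2))
          (radius ^ 2 - ((x - c_x) ^ 2 + (y - c_y) ^ 2)) hrad
          (by nlinarith [sq_nonneg (x - c_x), sq_nonneg (y - c_y)]) hneg,
        if_neg (not_lt.mpr hneg)]
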